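-- pv_equiv track=rewrite | github.com/hebaflemban/datastructure- | recursion_advanced.py | get_out
-- ===== SOURCE A (Python) =====
-- def get_out(zeros, start, end, path=[]):
--     current = start
--     path = path + [current]
--     i = current[0]
--     j = current[1]
--
--     adjacents = [ [i+1, j+1],[i,j+1], [i+1,j] ]
--
--     if current == end:
--         return path
--
--     for position in adjacents:
--         if position in zeros:
--             current = get_out(zeros, position, end, path)
--             if current:
--                 return current
--         else:
--             pass
-- ===== SOURCE B (Python) =====
-- def get_out(zeros, start, end, path=[]):
--     zset = set(map(tuple, zeros))
--     dead = set()
--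
--     def search(cur):
--         if cur == end:
--             return [cur]
--         i, j = cur[0], cur[1]
--         for pos in ([i + 1, j + 1], [i, j + 1], [i + 1, j]):
--             key = (pos[0], pos[1])
--             if key in zset and key not in dead:
--                 res = search(pos)
--                 if res is not None:
--                     return [cur] + res
--         dead.add(tuple(cur))
--         return None
--
--     res = search(start)
--     return path + res if res is not None else None
-- ===== Notes on version B (the rewrite author's own statement) =====
-- stated objective: alternative
-- what changed: B replaces A's re-exploring recursive DFS (list membership, path accumulated downward) with a tuple-set for cell membership plus a memo set of dead-end cells, building the path back up from the goal; the first-found path and its order are preserved exactly.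
import Mathlib
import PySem

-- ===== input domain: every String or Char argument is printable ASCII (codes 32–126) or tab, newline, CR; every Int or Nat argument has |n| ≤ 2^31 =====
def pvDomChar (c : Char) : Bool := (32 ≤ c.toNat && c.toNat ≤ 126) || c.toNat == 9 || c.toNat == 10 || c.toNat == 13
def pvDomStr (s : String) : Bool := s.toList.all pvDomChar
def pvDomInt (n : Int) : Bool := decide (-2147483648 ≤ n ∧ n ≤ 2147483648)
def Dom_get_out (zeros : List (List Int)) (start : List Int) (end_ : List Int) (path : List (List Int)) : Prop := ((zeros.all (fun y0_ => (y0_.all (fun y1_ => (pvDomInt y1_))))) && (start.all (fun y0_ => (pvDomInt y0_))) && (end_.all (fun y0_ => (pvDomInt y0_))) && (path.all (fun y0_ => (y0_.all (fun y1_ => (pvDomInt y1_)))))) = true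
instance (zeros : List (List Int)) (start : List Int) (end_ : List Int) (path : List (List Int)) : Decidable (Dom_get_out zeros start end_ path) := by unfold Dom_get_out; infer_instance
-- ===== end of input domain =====

-- B re-implements A's DFS with a set for cell membership and a memo set of dead-end
-- cells (alternative algorithm); the first-found path and its order are preserved exactly.

-- pvSum c = c[0] + c[1]; every cell the recursion moves to strictly increases this sum,
-- which gives the termination measure pvMu (number of zeros-cells with larger sum).
def pvSum (c : List Int) : Int := c.getD 0 0 + c.getD 1 0

def pvMu (zeros : List (List Int)) (c : List Int) : Nat :=
  (zeros.filter (fun z => pvSum c < pvSum z)).length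

-- termination lemma cited by both ports' decreasing_by
theorem pvMu_lt (zeros : List (List Int)) (c p : List Int)
    (hp : p ∈ zeros) (h : pvSum c < pvSum p) : pvMu zeros p < pvMu zeros c := by
  unfold pvMu
  induction zeros with
  | nil => cases hp
  | cons a tl ih =>
    rcases List.mem_cons.mp hp with rfl | hp
    · have h1 : (List.filter (fun z => decide (pvSum p < pvSum z)) tl).Sublist
          (List.filter (fun z => decide (pvSum c < pvSum z)) tl) := by
        apply List.monotone_filter_right
        intro z hz
        simp only [decide_eq_true_eq] at hz ⊢
        omega
      have := h1.length_le
      simp only [List.filter_cons]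
      have hc : decide (pvSum c < pvSum p) = true := by simpa using h
      have hpnot : decide (pvSum p < pvSum p) = false := by simp
      rw [hc, hpnot]
      simpa using Nat.lt_succ_of_le this
    · have := ih hp
      by_cases ha : pvSum p < pvSum a
      · have ha' : pvSum c < pvSum a := lt_trans h ha
        simp [ha, ha']
        omega
      · by_cases ha' : pvSum c < pvSum a
        · simp [ha, ha']
          omega
        · simp [ha, ha']
          omega

-- ===== PORT A =====
-- Literal port of A. Python raises IndexError on current[0]/current[1] when
-- len(start) < 2 (excluded by Pre_); on admitted inputs List.getD 0/1 is exact.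
-- The for-loop over the literal 3-element adjacents list is transcribed position by
-- position in the same order ('if current: return current' = the match on some).
def get_out (zeros : List (List Int)) (start : List Int) (end_ : List Int) (path : List (List Int)) : Option (List (List Int)) :=
  let current := start
  let path2 := path ++ [current]
  let i := current.getD 0 0
  let j := current.getD 1 0
  if current = end_ then some path2
  else
    match (if h1 : [i+1, j+1] ∈ zeros then get_out zeros [i+1, j+1] end_ path2 else none) with
    | some r => some r
    | none =>
      match (if h2 : [i, j+1] ∈ zeros then get_out zeros [i, j+1] end_ path2 else none) with
      | some r => some r
      | none =>
        if h3 : [i+1, j] ∈ zeros then get_out zeros [i+1, j] end_ path2 else none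
termination_by pvMu zeros start
decreasing_by
  all_goals exact pvMu_lt zeros start _ (by assumption) (by simp [pvSum]; all_goals omega)

-- ===== PORT B =====
-- the k-th adjacent of cell (i, j), in Source B's loop order
def pvAdj (i j : Int) : Nat → List Int
  | 0 => [i + 1, j + 1]
  | 1 => [i, j + 1]
  | _ => [i + 1, j]

-- Source B's inner `search` with the mutable dead-end set threaded through; `key in zset`
-- is ported as membership in zeros (same truth value as the tuple-set test), and the
-- for-loop over the three adjacents is the index recursion pvGo over k = 0,1,2.
mutual
def pvSearch (zeros : List (List Int)) (end_ : List Int) (cur : List Int) (dead : PySem.Set (List Int)) : Option (List (List Int)) × PySem.Set (List Int) :=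
  if cur = end_ then (some [cur], dead)
  else pvGo zeros end_ cur 0 dead
termination_by (pvMu zeros cur, 5)
decreasing_by
  exact Prod.Lex.right _ (by omega)

def pvGo (zeros : List (List Int)) (end_ : List Int) (cur : List Int) (k : Nat) (dead : PySem.Set (List Int)) : Option (List (List Int)) × PySem.Set (List Int) :=
  if hk : 3 ≤ k then (none, PySem.Set.add dead cur)
  else
    let pos := pvAdj (cur.getD 0 0) (cur.getD 1 0) k
    if hz : pos ∈ zeros ∧ ¬ pos ∈ dead then
      match pvSearch zeros end_ pos dead with
      | (some r, dead') => (some (cur :: r), dead')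
      | (none, dead') => pvGo zeros end_ cur (k + 1) dead'
    else pvGo zeros end_ cur (k + 1) dead
termination_by (pvMu zeros cur, 4 - k)
decreasing_by
  all_goals first
  | exact Prod.Lex.right _ (by omega)
  | exact Prod.Lex.left _ _ (pvMu_lt zeros cur _ hz.1 (by
      rcases k with _ | _ | _ | k <;> simp [pvSum, pvAdj] <;> omega))
end

def get_out_alt (zeros : List (List Int)) (start : List Int) (end_ : List Int) (path : List (List Int)) : Option (List (List Int)) :=
  match pvSearch zeros end_ start [] with
  | (some r, _) => some (path ++ r)
  | (none, _) => none

-- ===== PRECONDITION & SPEC =====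
-- Python A raises IndexError (current[0] / current[1]) whenever len(start) < 2;
-- Pre_ excludes exactly those inputs.
def Pre_get_out (zeros : List (List Int)) (start : List Int) (end_ : List Int) (path : List (List Int)) : Prop :=
  2 ≤ start.length
instance (zeros : List (List Int)) (start : List Int) (end_ : List Int) (path : List (List Int)) : Decidable (Pre_get_out zeros start end_ path) := by unfold Pre_get_out; infer_instance

def pvWitness_get_out : List (List Int) × List Int × List Int × List (List Int) :=
  ([[1, 1]], [0, 0], [1, 1], [])

def Spec_get_out (zeros : List (List Int)) (start : List Int) (end_ : List Int) (path : List (List Int)) (out : Option (List (List Int))) : Prop := out = get_out_alt zeros start end_ path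
instance (zeros : List (List Int)) (start : List Int) (end_ : List Int) (path : List (List Int)) (out : Option (List (List Int))) : Decidable (Spec_get_out zeros start end_ path out) := by unfold Spec_get_out; infer_instance

-- ===== CLAIM (what is proved, stated in full; the proofs are below) =====
def Claim_equal_get_out : Prop := ∀ (zeros : List (List Int)) (start : List Int) (end_ : List Int) (path : List (List Int)), Dom_get_out zeros start end_ path → Pre_get_out zeros start end_ path → Spec_get_out zeros start end_ path (get_out zeros start end_ path)


-- ===== LEMMAS AND PROOFS =====

-- A's loop body for one adjacent position pos of c, with path [c]
def pvTry (zeros : List (List Int)) (end_ c pos : List Int) : Option (List (List Int)) :=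
  if pos ∈ zeros then get_out zeros pos end_ [c] else none

-- A's remaining for-loop over the last m adjacents of c (m = 3,2,1,0), path [c]
def pvChain (zeros : List (List Int)) (end_ c : List Int) : Nat → Option (List (List Int))
  | 0 => none
  | m+1 =>
    match pvTry zeros end_ c (pvAdj (c.getD 0 0) (c.getD 1 0) (2 - m)) with
    | some r => some r
    | none => pvChain zeros end_ c m

-- invariant of B's dead-end set: every recorded cell is a dead end for A's search
def pvInv (zeros : List (List Int)) (end_ : List Int) (dead : List (List Int)) : Prop :=
  ∀ t ∈ dead, get_out zeros t end_ [] = none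

-- A's result with prefix path p is the prefix-free result with p prepended
theorem getA_prefix (zeros : List (List Int)) (end_ : List Int) :
    ∀ (n : Nat) (c : List Int) (p : List (List Int)), pvMu zeros c ≤ n →
      get_out zeros c end_ p = Option.map (fun r => p ++ r) (get_out zeros c end_ []) := by
  intro n
  induction n using Nat.strong_induction_on with
  | _ n IH =>
    intro c p hn
    by_cases hce : c = end_
    · conv_lhs => rw [get_out]
      conv_rhs => rw [get_out]
      simp [hce]
    · conv_lhs => rw [get_out]
      conv_rhs => rw [get_out]
      simp only [if_neg hce, dite_eq_ite, List.nil_append]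
      have key : ∀ pos : List Int, pvSum c < pvSum pos →
          (if pos ∈ zeros then get_out zeros pos end_ (p ++ [c]) else none)
          = Option.map (fun r => p ++ r)
              (if pos ∈ zeros then get_out zeros pos end_ [c] else none) := by
        intro pos hs
        by_cases hmem : pos ∈ zeros
        · simp only [if_pos hmem]
          have hmu : pvMu zeros pos < pvMu zeros c := pvMu_lt zeros c pos hmem hs
          have e1 := IH (pvMu zeros pos) (lt_of_lt_of_le hmu hn) pos (p ++ [c]) (le_refl _)
          have e2 := IH (pvMu zeros pos) (lt_of_lt_of_le hmu hn) pos [c] (le_refl _)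
          rw [e1, e2]
          cases get_out zeros pos end_ [] <;> simp
        · simp [hmem]
      have hs1 : pvSum c < pvSum [c.getD 0 0 + 1, c.getD 1 0 + 1] := by
        simp [pvSum]; omega
      have hs2 : pvSum c < pvSum [c.getD 0 0, c.getD 1 0 + 1] := by
        simp [pvSum]
      have hs3 : pvSum c < pvSum [c.getD 0 0 + 1, c.getD 1 0] := by
        simp [pvSum]
      rw [key _ hs1, key _ hs2, key _ hs3]
      cases hA : (if [c.getD 0 0 + 1, c.getD 1 0 + 1] ∈ zeros then
          get_out zeros [c.getD 0 0 + 1, c.getD 1 0 + 1] end_ [c] else none) <;>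
        cases hB : (if [c.getD 0 0, c.getD 1 0 + 1] ∈ zeros then
            get_out zeros [c.getD 0 0, c.getD 1 0 + 1] end_ [c] else none) <;>
          cases hC : (if [c.getD 0 0 + 1, c.getD 1 0] ∈ zeros then
              get_out zeros [c.getD 0 0 + 1, c.getD 1 0] end_ [c] else none) <;>
            simp

-- for c ≠ end, A's prefix-free result is its for-loop over the three adjacents
theorem getA_ne (zeros : List (List Int)) (end_ c : List Int) (hce : ¬ c = end_) :
    get_out zeros c end_ [] = pvChain zeros end_ c 3 := by
  conv_lhs => rw [get_out]
  simp only [if_neg hce, dite_eq_ite, List.nil_append]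
  simp only [pvChain, pvTry, pvAdj]
  cases (if [c.getD 0 0 + 1, c.getD 1 0] ∈ zeros then
      get_out zeros [c.getD 0 0 + 1, c.getD 1 0] end_ [c] else none) <;> rfl

-- B's inner loop pvGo from index k computes A's remaining chain and keeps the invariant
theorem pvGo_eq (zeros : List (List Int)) (end_ : List Int) (n : Nat)
    (SIH : ∀ (c' : List Int) (dead : List (List Int)), pvMu zeros c' < n →
      pvInv zeros end_ dead →
      (pvSearch zeros end_ c' dead).1 = get_out zeros c' end_ [] ∧
        pvInv zeros end_ (pvSearch zeros end_ c' dead).2)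
    (c : List Int) (hn : pvMu zeros c ≤ n) :
    ∀ (m k : Nat), k + m = 3 → ∀ dead, pvInv zeros end_ dead →
      (pvChain zeros end_ c m = none → get_out zeros c end_ [] = none) →
      (pvGo zeros end_ c k dead).1 = pvChain zeros end_ c m ∧
        pvInv zeros end_ (pvGo zeros end_ c k dead).2 := by
  intro m
  induction m with
  | zero =>
    intro k hk dead hInv hnone
    have hk3 : k = 3 := by omega
    subst hk3
    rw [pvGo]
    simp only [le_refl, dite_true]
    refine ⟨rfl, ?_⟩
    intro t ht
    unfold PySem.Set.add at ht
    rcases (by split at ht <;> simp_all : t ∈ dead ∨ t = c) with h | rfl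
    · exact hInv t h
    · exact hnone rfl
  | succ m ih =>
    intro k hk dead hInv hnone
    have hklt : ¬ 3 ≤ k := by omega
    have hkm : 2 - m = k := by omega
    have hchain : pvChain zeros end_ c (m + 1) =
        match pvTry zeros end_ c (pvAdj (c.getD 0 0) (c.getD 1 0) k) with
        | some r => some r
        | none => pvChain zeros end_ c m := by
      rw [pvChain, hkm]
    rw [pvGo]
    simp only [dif_neg hklt]
    by_cases hz : pvAdj (c.getD 0 0) (c.getD 1 0) k ∈ zeros ∧
        ¬ pvAdj (c.getD 0 0) (c.getD 1 0) k ∈ dead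
    · rw [dif_pos hz]
      have hsum : pvSum c < pvSum (pvAdj (c.getD 0 0) (c.getD 1 0) k) := by
        rcases k with _ | _ | _ | k
        · simp [pvSum, pvAdj]; omega
        · simp [pvSum, pvAdj]
        · simp [pvSum, pvAdj]
        · omega
      have hmu := pvMu_lt zeros c _ hz.1 hsum
      obtain ⟨hres, hInv'⟩ := SIH _ dead (lt_of_lt_of_le hmu hn) hInv
      have hpre := getA_prefix zeros end_ (pvMu zeros (pvAdj (c.getD 0 0) (c.getD 1 0) k))
        (pvAdj (c.getD 0 0) (c.getD 1 0) k) [c] (le_refl _)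
      rcases hps : pvSearch zeros end_ (pvAdj (c.getD 0 0) (c.getD 1 0) k) dead with ⟨res, dead'⟩
      rw [hps] at hres hInv'
      have ht : pvTry zeros end_ c (pvAdj (c.getD 0 0) (c.getD 1 0) k) =
          Option.map (fun r => [c] ++ r) res := by
        unfold pvTry
        rw [if_pos hz.1, hpre,
          show res = get_out zeros (pvAdj (c.getD 0 0) (c.getD 1 0) k) end_ [] from hres]
      cases res with
      | some r =>
        simp only [hchain, ht, Option.map_some]
        exact ⟨rfl, hInv'⟩
      | none =>
        simp only []
        have hchain' : pvChain zeros end_ c (m + 1) = pvChain zeros end_ c m := by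
          rw [hchain, ht]
          rfl
        obtain ⟨h1, h2⟩ := ih (k + 1) (by omega) dead' hInv'
          (fun h => hnone (by rw [hchain']; exact h))
        exact ⟨by rw [hchain']; exact h1, h2⟩
    · rw [dif_neg hz]
      have ht : pvTry zeros end_ c (pvAdj (c.getD 0 0) (c.getD 1 0) k) = none := by
        unfold pvTry
        by_cases hmem : pvAdj (c.getD 0 0) (c.getD 1 0) k ∈ zeros
        · have hdead : pvAdj (c.getD 0 0) (c.getD 1 0) k ∈ dead := by tauto
          rw [if_pos hmem,
            getA_prefix zeros end_ (pvMu zeros (pvAdj (c.getD 0 0) (c.getD 1 0) k)) _ [c]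
              (le_refl _),
            hInv _ hdead]
          rfl
        · rw [if_neg hmem]
      have hchain' : pvChain zeros end_ c (m + 1) = pvChain zeros end_ c m := by
        rw [hchain, ht]
      obtain ⟨h1, h2⟩ := ih (k + 1) (by omega) dead hInv
        (fun h => hnone (by rw [hchain']; exact h))
      exact ⟨by rw [hchain']; exact h1, h2⟩

-- B's search computes exactly A's prefix-free result and keeps the invariant
theorem pvSearch_eq (zeros : List (List Int)) (end_ : List Int) :
    ∀ (n : Nat) (c : List Int) (dead : List (List Int)), pvMu zeros c ≤ n →
      pvInv zeros end_ dead →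
      (pvSearch zeros end_ c dead).1 = get_out zeros c end_ [] ∧
        pvInv zeros end_ (pvSearch zeros end_ c dead).2 := by
  intro n
  induction n using Nat.strong_induction_on with
  | _ n IH =>
    intro c dead hn hInv
    rw [pvSearch]
    by_cases hce : c = end_
    · subst hce
      constructor
      · conv_rhs => rw [get_out]
        simp
      · simpa using hInv
    · simp only [if_neg hce]
      have SIH : ∀ (c' : List Int) (dead' : List (List Int)), pvMu zeros c' < n →
          pvInv zeros end_ dead' →
          (pvSearch zeros end_ c' dead').1 = get_out zeros c' end_ [] ∧
            pvInv zeros end_ (pvSearch zeros end_ c' dead').2 :=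
        fun c' dead' h hI => IH (pvMu zeros c') h c' dead' (le_refl _) hI
      obtain ⟨h1, h2⟩ := pvGo_eq zeros end_ n SIH c hn 3 0 rfl dead hInv
        (fun h => by rw [getA_ne zeros end_ c hce]; exact h)
      exact ⟨by rw [h1, getA_ne zeros end_ c hce], h2⟩

-- ===== VERDICT (by name: the statement is the Claim_ definition above) =====
theorem get_out_spec : Claim_equal_get_out := by
  intro zeros start end_ path _ _
  unfold Spec_get_out get_out_alt
  obtain ⟨h1, _⟩ := pvSearch_eq zeros end_ (pvMu zeros start) start [] (le_refl _)
    (by intro t ht; cases ht)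
  have hp := getA_prefix zeros end_ (pvMu zeros start) start path (le_refl _)
  rcases hps : pvSearch zeros end_ start [] with ⟨res, dead⟩
  rw [hps] at h1
  simp only [] at h1
  cases res with
  | none =>
    rw [hp, ← h1]
    rfl
  | some r =>
    rw [hp, ← h1]
    rfl
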